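-- pv_equiv track=rewrite | github.com/tagore8661/accenture-coding-practice | Problem-25.py | find_rhyming_word
-- ===== SOURCE A (Python) =====
-- def find_rhyming_word(S, D):
--     """
--     Finds the best rhyming word from the dictionary.
--
--     Args:
--         S: The word to find a rhyme for.
--         D: The dictionary of words.
--
--     Returns:
--         The best rhyming word from the dictionary, or "No Word" if none is found.
--     """
--
--     # Find the last syllable of the input word
--     last_syllable = S.split()[-1]
--
--     # Iterate through the dictionary words and find the best match
--     best_match = None
--     best_match_length = 0
--     for word in D:
--         last_word_syllable = word.split()[-1]
--         if last_word_syllable[-len(last_syllable):] == last_syllable: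
--             if len(last_word_syllable) > best_match_length:
--                 best_match = word
--                 best_match_length = len(last_word_syllable)
--
--     # Return the best match or "No Word"
--     if best_match:
--         return best_match
--     else:
--         return "No Word"
-- ===== SOURCE B (Python) =====
-- def find_rhyming_word(S, D):
--     """Sort-then-scan reformulation: order the dictionary by last-syllable
--     length, longest first (stable, so ties keep dictionary order), then
--     return the first word whose last syllable ends with S's last syllable."""
--     suffix = S.split()[-1]
--     for word in sorted(D, key=lambda w: len(w.split()[-1]), reverse=True):
--         if word.split()[-1].endswith(suffix):
--             return word
--     return "No Word"
-- ===== Notes on version B (the rewrite author's own statement) =====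
-- stated objective: alternative
-- what changed: Replaced the single-pass best-match accumulator loop with a staged sort of the dictionary by last-syllable length (descending, stable) followed by an early-exit scan returning the first rhyming word; the stable reverse sort reproduces A's first-seen tie-break.
import Mathlib
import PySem

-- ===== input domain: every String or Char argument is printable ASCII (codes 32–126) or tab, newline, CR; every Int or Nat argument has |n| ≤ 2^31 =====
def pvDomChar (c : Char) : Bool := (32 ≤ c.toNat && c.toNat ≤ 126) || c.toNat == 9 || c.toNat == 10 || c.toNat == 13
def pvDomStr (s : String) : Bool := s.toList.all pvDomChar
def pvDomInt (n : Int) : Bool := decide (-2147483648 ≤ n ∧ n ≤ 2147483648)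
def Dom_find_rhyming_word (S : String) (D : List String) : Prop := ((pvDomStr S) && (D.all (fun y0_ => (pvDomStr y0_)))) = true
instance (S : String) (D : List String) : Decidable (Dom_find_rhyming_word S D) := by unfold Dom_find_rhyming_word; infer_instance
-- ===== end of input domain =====

-- B replaces A's single-pass best/best-length accumulator loop with a stable descending sort by last-syllable length followed by a first-match scan (same result, different staging).


-- ===== PORT A =====
def find_rhyming_word (S : String) (D : List String) : String :=
  match PySem.List.pyGet? (PySem.Str.split₀ S) (-1) with
  | none => "No Word"  -- Python raises IndexError here; excluded by Pre_
  | some last_syllable =>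
    let r := D.foldl (fun (st : Option String × Int) word =>
      match PySem.List.pyGet? (PySem.Str.split₀ word) (-1) with
      | none => st  -- Python raises IndexError here; excluded by Pre_
      | some last_word_syllable =>
        if PySem.Str.slice last_word_syllable (some (-(PySem.Str.len last_syllable))) none = last_syllable then
          if st.2 < PySem.Str.len last_word_syllable then (some word, PySem.Str.len last_word_syllable)
          else st
        else st) (none, 0)
    match r.1 with
    | some w => if w.isEmpty then "No Word" else w  -- `if best_match:` truthiness
    | none => "No Word"

-- ===== PORT B =====
-- B-side helper: w.split()[-1] (the "" default is only reached where Python B raises, outside Pre_)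
def pvSyl (w : String) : String := (PySem.List.pyGet? (PySem.Str.split₀ w) (-1)).getD ""

def find_rhyming_word_alt (S : String) (D : List String) : String :=
  let suffix := pvSyl S
  match (PySem.List.sorted D (fun w => PySem.Str.len (pvSyl w)) true).find?
      (fun word => PySem.Str.endswith (pvSyl word) suffix) with
  | some word => word
  | none => "No Word"

-- ===== PRECONDITION & SPEC =====
-- Pre_ excludes exactly the inputs where Python A raises IndexError: a whitespace-only/empty S,
-- or a whitespace-only/empty word in D (split() is empty there, so [-1] raises).
def Pre_find_rhyming_word (S : String) (D : List String) : Prop :=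
  PySem.Str.split₀ S ≠ [] ∧ ∀ w ∈ D, PySem.Str.split₀ w ≠ []
instance (S : String) (D : List String) : Decidable (Pre_find_rhyming_word S D) := by
  unfold Pre_find_rhyming_word; infer_instance

def pvWitness_find_rhyming_word : String × List String := ("big cat", ["hat", "dog mat", "xyz"])

def Spec_find_rhyming_word (S : String) (D : List String) (out : String) : Prop := out = find_rhyming_word_alt S D
instance (S : String) (D : List String) (out : String) : Decidable (Spec_find_rhyming_word S D out) := by unfold Spec_find_rhyming_word; infer_instance

-- ===== CLAIM (what is proved, stated in full; the proofs are below) =====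
def Claim_equal_find_rhyming_word : Prop := ∀ (S : String) (D : List String), Dom_find_rhyming_word S D → Pre_find_rhyming_word S D → Spec_find_rhyming_word S D (find_rhyming_word S D)

-- ===== LEMMAS AND PROOFS =====

-- proof-side abbreviation of A's accumulator step, restricted to the matching words
def pvStep (acc : Option String) (x : String) : Option String :=
  match acc with
  | none => some x
  | some m => if PySem.Str.len (pvSyl m) < PySem.Str.len (pvSyl x) then some x else some m

theorem pyGet?_mem {α : Type} {xs : List α} {i : Int} {x : α}
    (h : PySem.List.pyGet? xs i = some x) : x ∈ xs := by
  simp only [PySem.List.pyGet?, Option.bind_eq_some_iff] at h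
  obtain ⟨k, -, hk⟩ := h
  exact List.mem_of_getElem? hk

theorem pyGet?_last_of_ne_nil {xs : List String} (h : xs ≠ []) :
    ∃ x, PySem.List.pyGet? xs (-1) = some x := by
  cases hg : PySem.List.pyGet? xs (-1) with
  | none =>
    exfalso
    apply h
    simp only [PySem.List.pyGet?, PySem.List.pyIdx?] at hg
    rcases e : xs with _ | ⟨a, l⟩
    · rfl
    · rw [e] at hg; simp at hg
  | some x => exact ⟨x, rfl⟩

-- every word produced by split() is nonempty
theorem split₀_go_ne_nil (s cur : List Char) (acc : List (List Char))
    (hacc : ∀ a ∈ acc, a ≠ []) :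
    ∀ w ∈ PySem.Chars.split₀.go s cur acc, w ≠ [] := by
  induction s generalizing cur acc with
  | nil =>
    intro w hw
    simp only [PySem.Chars.split₀.go] at hw
    by_cases hc : cur.isEmpty = true
    · rw [if_pos hc] at hw
      exact hacc _ (List.mem_reverse.1 hw)
    · rw [if_neg hc] at hw
      rcases List.mem_cons.1 (List.mem_reverse.1 hw) with rfl | h
      · simp only [List.isEmpty_iff] at hc
        simpa using hc
      · exact hacc _ h
  | cons c rest ih =>
    intro w hw
    simp only [PySem.Chars.split₀.go] at hw
    by_cases hs : PySem.Chars.isspace c = true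
    · rw [if_pos hs] at hw
      by_cases hc : cur.isEmpty = true
      · rw [if_pos hc] at hw
        exact ih [] acc hacc w hw
      · rw [if_neg hc] at hw
        refine ih [] (cur.reverse :: acc) ?_ w hw
        intro a ha
        rcases List.mem_cons.1 ha with rfl | h
        · simp only [List.isEmpty_iff] at hc
          simpa using hc
        · exact hacc _ h
    · rw [if_neg hs] at hw
      exact ih (c :: cur) acc hacc w hw

theorem mem_split₀_ne_nil {s w : List Char} (hw : w ∈ PySem.Chars.split₀ s) : w ≠ [] :=
  split₀_go_ne_nil s [] [] (by simp) w hw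

theorem mem_str_split₀_ne_empty {s w : String} (hw : w ∈ PySem.Str.split₀ s) :
    w.toList ≠ [] := by
  simp only [PySem.Str.split₀, List.mem_map] at hw
  obtain ⟨l, hl, rfl⟩ := hw
  simpa using mem_split₀_ne_nil hl

-- A's slice test IS endswith, for a nonempty suffix
theorem slice_test_iff_endswith (lws ls : String) (hls : ls.toList ≠ []) :
    (PySem.Str.slice lws (some (-(PySem.Str.len ls))) none = ls)
      ↔ PySem.Str.endswith lws ls = true := by
  have hk : 0 < ls.toList.length := List.length_pos_iff.2 hls
  simp only [PySem.Str.slice, PySem.Str.len, PySem.Str.endswith,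
    PySem.Chars.slice_eq_listSlice]
  rw [PySem.List.slice_from_neg_natCast _ _ hk]
  constructor
  · intro h
    have h' : lws.toList.drop (lws.toList.length - ls.toList.length) = ls.toList := by
      have := congrArg String.toList h; simpa using this
    rw [PySem.Chars.endswith_iff]
    exact (List.suffix_iff_eq_drop).2 h'.symm
  · intro h
    have h' := (List.suffix_iff_eq_drop).1 ((PySem.Chars.endswith_iff _ _).1 h)
    rw [← h']
    simp [String.ofList]

-- the loop invariant: A's fold equals the pvStep-fold over the filtered list
theorem loop_eq (ls : String) (hls : ls.toList ≠ []) :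
    ∀ (D : List String) (b : Option String) (n : Int),
      (∀ w ∈ D, PySem.Str.split₀ w ≠ []) →
      (∀ m, b = some m → n = PySem.Str.len (pvSyl m)) →
      (b = none → n = 0) →
      (D.foldl (fun (st : Option String × Int) word =>
        match PySem.List.pyGet? (PySem.Str.split₀ word) (-1) with
        | none => st
        | some lws =>
          if PySem.Str.slice lws (some (-(PySem.Str.len ls))) none = ls then
            if st.2 < PySem.Str.len lws then (some word, PySem.Str.len lws)
            else st
          else st) (b, n)).1
      = List.foldl pvStep b (D.filter (fun w => PySem.Str.endswith (pvSyl w) ls)) := by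
  intro D
  induction D with
  | nil => intro b n _ _ _; rfl
  | cons w t ih =>
    intro b n hD hb hn
    have hw : PySem.Str.split₀ w ≠ [] := hD w (List.mem_cons_self)
    have ht : ∀ x ∈ t, PySem.Str.split₀ x ≠ [] := fun x hx => hD x (List.mem_cons_of_mem _ hx)
    obtain ⟨lws, hlws⟩ := pyGet?_last_of_ne_nil hw
    have hsylw : pvSyl w = lws := by simp [pvSyl, hlws]
    have hlwsne : lws.toList ≠ [] := mem_str_split₀_ne_empty (pyGet?_mem hlws)
    have hlwspos : (0 : Int) < PySem.Str.len lws := by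
      simp only [PySem.Str.len]
      exact_mod_cast List.length_pos_iff.2 hlwsne
    simp only [List.foldl_cons, List.filter_cons, hlws, hsylw]
    by_cases hm : PySem.Str.endswith lws ls = true
    · rw [if_pos hm]
      rw [if_pos ((slice_test_iff_endswith lws ls hls).2 hm)]
      cases b with
      | none =>
        have hn0 : n = 0 := hn rfl
        rw [if_pos (by rw [hn0]; exact hlwspos)]
        rw [List.foldl_cons, (rfl : pvStep none w = some w)]
        exact ih (some w) (PySem.Str.len lws) ht
          (fun m hm' => by cases hm'; simp [pvSyl, hlws]) (by intro h; cases h)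
      | some m =>
        have hbn : n = PySem.Str.len (pvSyl m) := hb m rfl
        rw [List.foldl_cons]
        have hstep : pvStep (some m) w
            = if PySem.Str.len (pvSyl m) < PySem.Str.len lws then some w else some m := by
          simp [pvStep, hsylw]
        rw [hstep, hbn]
        by_cases hlt : PySem.Str.len (pvSyl m) < PySem.Str.len lws
        · rw [if_pos hlt, if_pos hlt]
          exact ih (some w) (PySem.Str.len lws) ht
            (fun m' hm' => by cases hm'; simp [pvSyl, hlws]) (by intro h; cases h)
        · rw [if_neg hlt, if_neg hlt]
          exact ih (some m) (PySem.Str.len (pvSyl m)) ht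
            (fun m' hm' => by cases hm'; rfl) (by intro h; cases h)
    · rw [if_neg (fun hc => hm ((slice_test_iff_endswith lws ls hls).1 hc))]
      rw [if_neg hm]
      exact ih b n ht hb hn

-- inserting a NON-matching word does not change the first match
theorem find?_insertBy_neg (p : String → Bool) (bf : String → String → Bool) (x : String)
    (hx : p x = false) :
    ∀ L : List String, (PySem.List.insertBy bf x L).find? p = L.find? p := by
  intro L
  induction L with
  | nil => simp [PySem.List.insertBy, List.find?, hx]
  | cons y ys ih =>
    simp only [PySem.List.insertBy]
    by_cases hb : bf x y = true
    · simp [hb, List.find?, hx]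
    · simp only [hb, if_neg, Bool.not_eq_true] at *
      cases hp : p y with
      | true => simp [List.find?, hp]
      | false => simp [List.find?, hp, ih]

-- inserting a MATCHING word into a key-descending list: the first match afterwards
-- is the new word exactly when its key beats the old first match (pvStep's rule)
theorem find?_insertBy_pos (p : String → Bool) (key : String → Int) (x : String)
    (hx : p x = true) :
    ∀ L : List String, L.Pairwise (fun a b => key b ≤ key a) →
      (PySem.List.insertBy (fun a b => decide (key b < key a)) x L).find? p
        = match L.find? p with
          | none => some x
          | some m => if key m < key x then some x else some m := by
  intro L
  induction L with
  | nil => intro _; simp [PySem.List.insertBy, List.find?, hx]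
  | cons y ys ih =>
    intro hpw
    have hpw' : ys.Pairwise (fun a b => key b ≤ key a) := hpw.of_cons
    simp only [PySem.List.insertBy]
    by_cases hb : key y < key x
    · rw [if_pos (by simpa using hb)]
      cases hf : (y :: ys).find? p with
      | none => simp [List.find?, hx]
      | some m =>
        have hm : m ∈ y :: ys := List.mem_of_find?_eq_some hf
        have hle : key m ≤ key y := by
          rcases List.mem_cons.1 hm with rfl | hm'
          · exact le_refl _
          · exact (List.pairwise_cons.1 hpw).1 m hm'
        have hlt : key m < key x := lt_of_le_of_lt hle hb
        simp [List.find?, hx, hlt]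
    · rw [if_neg (by simpa using hb)]
      cases hp : p y with
      | true =>
        simp only [List.find?, hp]
        rw [if_neg hb]
      | false =>
        simp only [List.find?, hp]
        simpa using ih hpw'
-- first match of the descending stable sort = A's first-strict-max accumulator over the matches
theorem find?_sorted_eq_foldl (p : String → Bool) :
    ∀ D : List String,
      (PySem.List.sorted D (fun w => PySem.Str.len (pvSyl w)) true).find? p
        = List.foldl pvStep none (D.filter p) := by
  intro D
  induction D using List.reverseRecOn with
  | nil => rfl
  | append_singleton D x ih =>
    have hsr : ∀ E : List String, PySem.List.sorted E (fun w => PySem.Str.len (pvSyl w)) true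
        = List.foldl (fun acc y =>
            PySem.List.insertBy (fun a b => decide (PySem.Str.len (pvSyl b) < PySem.Str.len (pvSyl a))) y acc) [] E :=
      fun E => PySem.List.sorted_rev_eq_foldl_insertBy E _
    have hstep : PySem.List.sorted (D ++ [x]) (fun w => PySem.Str.len (pvSyl w)) true
        = PySem.List.insertBy (fun a b => decide (PySem.Str.len (pvSyl b) < PySem.Str.len (pvSyl a))) x
            (PySem.List.sorted D (fun w => PySem.Str.len (pvSyl w)) true) := by
      rw [hsr, hsr, List.foldl_append, List.foldl_cons, List.foldl_nil]
    have hpwD : (PySem.List.sorted D (fun w => PySem.Str.len (pvSyl w)) true).Pairwise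
        (fun a b => PySem.Str.len (pvSyl b) ≤ PySem.Str.len (pvSyl a)) :=
      PySem.List.sorted_pairwise_rev D _
    rw [hstep, List.filter_append]
    cases hp : p x with
    | false =>
      rw [find?_insertBy_neg p _ x hp, ih]
      simp [hp]
    | true =>
      rw [find?_insertBy_pos p (fun w => PySem.Str.len (pvSyl w)) x hp _ hpwD, ih]
      simp only [List.filter_cons, hp, List.filter_nil, List.foldl_append]
      cases List.foldl pvStep none (D.filter p) with
      | none => rfl
      | some m => simp [pvStep]

theorem foldl_pvStep_mem :
    ∀ (xs : List String) (b : Option String) (m : String),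
      List.foldl pvStep b xs = some m → b = some m ∨ m ∈ xs := by
  intro xs
  induction xs with
  | nil => intro b m h; exact Or.inl h
  | cons x t ih =>
    intro b m h
    rw [List.foldl_cons] at h
    rcases ih _ m h with h' | h'
    · cases b with
      | none =>
        right
        simp only [pvStep] at h'
        exact List.mem_cons.2 (Or.inl (Option.some.inj h').symm)
      | some b0 =>
        simp only [pvStep] at h'
        split at h'
        · right; exact List.mem_cons.2 (Or.inl (Option.some.inj h').symm)
        · exact Or.inl h'
    · right; exact List.mem_cons_of_mem _ h'

-- ===== VERDICT (by name: the statement is the Claim_ definition above) =====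
theorem find_rhyming_word_spec : Claim_equal_find_rhyming_word := by
  intro S D _ hpre
  obtain ⟨hS, hD⟩ := hpre
  unfold Spec_find_rhyming_word find_rhyming_word find_rhyming_word_alt
  obtain ⟨ls, hls⟩ := pyGet?_last_of_ne_nil hS
  have hsylS : pvSyl S = ls := by simp [pvSyl, hls]
  have hlsne : ls.toList ≠ [] := mem_str_split₀_ne_empty (pyGet?_mem hls)
  rw [hls]
  simp only [hsylS]
  have hloop := loop_eq ls hlsne D none 0 hD (by intro m h; cases h) (fun _ => rfl)
  have hfind := find?_sorted_eq_foldl (fun w => PySem.Str.endswith (pvSyl w) ls) D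
  rw [hloop, hfind]
  cases hres : List.foldl pvStep none
      (D.filter (fun w => PySem.Str.endswith (pvSyl w) ls)) with
  | none => rfl
  | some w =>
    have hwmem : w ∈ D := by
      rcases foldl_pvStep_mem _ none w hres with h | h
      · cases h
      · exact List.mem_of_mem_filter h
    have hwne : w ≠ "" := fun h => hD w hwmem (by rw [h]; decide)
    have hWE : w.isEmpty = false := by
      cases hE : w.isEmpty
      · rfl
      · exact absurd (String.isEmpty_iff.1 hE) hwne
    simp [hWE]
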